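-- pv_equiv track=rewrite | github.com/Teravla/Advent_Of_Code2025 | 7/Part_2/main_sparse.py | count_timelines_super_fast
-- ===== SOURCE A (Python) =====
-- from collections import defaultdict
--
-- def find_start(grid):
--     for r, row in enumerate(grid):
--         for c, val in enumerate(row):
--             if val == "S":
--                 return r, c
--     raise ValueError("Start 'S' not found")
--
-- def count_timelines_super_fast(grid):
--     rows, cols = len(grid), len(grid[0])
--     start_r, start_c = find_start(grid)
--     current = {start_c: 1}
--
--     for r in range(start_r + 1, rows):
--         next_line = defaultdict(int)
--         for c, count in current.items():
--             cell = grid[r][c]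
--             if cell == ".":
--                 next_line[c] += count
--             elif cell == "^":
--                 if c - 1 >= 0:
--                     next_line[c - 1] += count
--                 if c + 1 < cols:
--                     next_line[c + 1] += count
--         current = next_line
--     return sum(current.values())
-- ===== SOURCE B (Python) =====
-- def find_start(grid):
--     for r, row in enumerate(grid):
--         for c, val in enumerate(row):
--             if val == "S":
--                 return r, c
--     raise ValueError("Start 'S' not found")
--
-- def count_timelines_super_fast(grid):
--     # Two passes instead of A's forward count propagation:
--     # pass 1 records, per row, the reachable columns and their target columns;
--     # pass 2 accumulates timeline weights backward (bottom-up) over those records.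
--     rows, cols = len(grid), len(grid[0])
--     start_r, start_c = find_start(grid)
--     layers = []
--     frontier = {start_c}
--     for r in range(start_r + 1, rows):
--         layer = []
--         nxt = set()
--         for c in frontier:
--             cell = grid[r][c]
--             if cell == ".":
--                 ts = [c]
--             elif cell == "^":
--                 ts = ([c - 1] if c - 1 >= 0 else []) + ([c + 1] if c + 1 < cols else [])
--             else:
--                 ts = []
--             layer.append((c, ts))
--             nxt.update(ts)
--         layers.append(layer)
--         frontier = nxt
--     w = {}
--     for layer in reversed(layers):
--         w = {c: sum(w.get(t, 1) for t in ts) for c, ts in layer}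
--     return w.get(start_c, 1)
-- ===== Notes on version B (the rewrite author's own statement) =====
-- stated objective: alternative
-- what changed: A propagates a sparse dict of per-column timeline counts forward row by row; B makes one forward pass recording only the reachable columns and their split targets per row, then a backward pass that accumulates timeline weights bottom-up from those records, reading the answer at the start column.
import Mathlib
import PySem

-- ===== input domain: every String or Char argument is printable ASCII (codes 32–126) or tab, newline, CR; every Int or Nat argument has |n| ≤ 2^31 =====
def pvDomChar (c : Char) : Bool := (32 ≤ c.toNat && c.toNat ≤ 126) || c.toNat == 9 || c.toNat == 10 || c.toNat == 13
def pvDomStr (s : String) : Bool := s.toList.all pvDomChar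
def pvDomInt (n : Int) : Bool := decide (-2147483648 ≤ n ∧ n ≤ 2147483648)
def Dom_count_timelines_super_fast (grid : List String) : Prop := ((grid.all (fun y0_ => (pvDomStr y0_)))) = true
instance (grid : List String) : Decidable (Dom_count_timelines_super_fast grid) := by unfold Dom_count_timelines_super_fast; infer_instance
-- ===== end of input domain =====

-- B replaces A's forward propagation of a sparse per-column count dict by two passes:
-- a forward pass recording only the reachable columns with their split targets per row,
-- and a backward pass accumulating timeline weights bottom-up from those records
-- (alternative decomposition, same asymptotic cost).

-- ===== PORT A =====
-- shared helper: port of the module helper find_start (none = ValueError)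
def pvFindStart (grid : List String) : Option (Int × Int) :=
  (PySem.List.enumerate grid 0).findSome? (fun p =>
    ((PySem.List.enumerate p.2.toList 0).find? (fun q => q.2 == 'S')).map (fun q => (p.1, q.1)))

def count_timelines_super_fast (grid : List String) : Int :=
  let rows : Int := grid.length
  let cols : Int := ((PySem.List.pyGetD grid 0 "").toList.length : Int)
  match pvFindStart grid with
  | none => 0   -- Python raises ValueError here; excluded by Pre_
  | some (start_r, start_c) =>
    let current : PySem.Dict Int Int := (PySem.Dict.empty).insert start_c 1
    let final := (PySem.List.pyRange (start_r + 1) rows 1).foldl (fun current r =>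
      current.items.foldl (fun next_line p =>
        let c := p.1
        let count := p.2
        let cell := PySem.Str.pyGet? (PySem.List.pyGetD grid r "") c  -- none = IndexError, excluded by Pre_
        if cell = some '.' then next_line.modify c 0 (· + count)
        else if cell = some '^' then
          let nl := if c - 1 ≥ 0 then next_line.modify (c - 1) 0 (· + count) else next_line
          if c + 1 < cols then nl.modify (c + 1) 0 (· + count) else nl
        else next_line) PySem.Dict.empty) current
    final.values.sum

-- ===== PORT B =====
def count_timelines_super_fast_alt (grid : List String) : Int :=
  let rows : Int := grid.length
  let cols : Int := ((PySem.List.pyGetD grid 0 "").toList.length : Int)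
  match pvFindStart grid with
  | none => 0   -- Python raises ValueError here; excluded by Pre_
  | some (start_r, start_c) =>
    -- pass 1: per row, the reachable columns with their target columns
    let st := (PySem.List.pyRange (start_r + 1) rows 1).foldl
      (fun (st : List (List (Int × List Int)) × PySem.Set Int) r =>
        let lf := st.2.foldl
          (fun (lf : List (Int × List Int) × PySem.Set Int) c =>
            let cell := PySem.Str.pyGet? (PySem.List.pyGetD grid r "") c  -- none = IndexError, excluded by Pre_
            let ts : List Int :=
              if cell = some '.' then [c]
              else if cell = some '^' then
                (if c - 1 ≥ 0 then [c - 1] else []) ++ (if c + 1 < cols then [c + 1] else [])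
              else []
            (lf.1 ++ [(c, ts)], PySem.Set.update lf.2 ts))
          ([], PySem.Set.ofList [])
        (st.1 ++ [lf.1], lf.2))
      ([], PySem.Set.ofList [start_c])
    -- pass 2: backward weight accumulation over the recorded layers
    let w := st.1.reverse.foldl
      (fun (w : PySem.Dict Int Int) layer =>
        layer.foldl (fun nw (p : Int × List Int) =>
          nw.insert p.1 ((p.2.map (fun t => w.getD t 1)).sum)) PySem.Dict.empty)
      PySem.Dict.empty
    w.getD start_c 1

-- ===== PRECONDITION & SPEC =====
-- pvRow grid r = grid[r] as a char list ("" when r is out of range); used to state Pre_.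
def pvRow (grid : List String) (r : Nat) : List Char := (grid.getD r "").toList

-- target columns of the cell at column c of a row: '.' stays, '^' splits to the
-- in-range neighbours, anything else blocks
def pvTargets (cols : Nat) (row : List Char) (c : Nat) : List Nat :=
  if row.getD c ' ' = '.' then [c]
  else if row.getD c ' ' = '^' then
    (if 1 ≤ c then [c - 1] else []) ++ (if c + 1 < cols then [c + 1] else [])
  else []

-- pvReach cols rows front = true iff, propagating the frontier of reachable columns
-- through the given rows, every reachable column is inside its row
def pvReach (cols : Nat) (rs : List (List Char)) (front : List Nat) : Bool :=
  match rs with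
  | [] => true
  | ρ :: rest =>
    front.all (fun c => decide (c < ρ.length)) &&
    pvReach cols rest (PySem.List.dedup (front.flatMap (pvTargets cols ρ)))

-- Pre_ excludes exactly the inputs on which A raises: the empty grid and grids without an
-- 'S' (ValueError), and grids in which some column reachable from the start indexes past
-- the end of its (shorter, ragged) row (IndexError).
def Pre_count_timelines_super_fast (grid : List String) : Prop :=
  grid ≠ [] ∧
  ∃ sr < grid.length, ∃ sc < (pvRow grid sr).length,
    (pvRow grid sr).getD sc ' ' = 'S' ∧
    (∀ i < sr, 'S' ∉ pvRow grid i) ∧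
    (∀ j < sc, (pvRow grid sr).getD j ' ' ≠ 'S') ∧
    pvReach (pvRow grid 0).length ((grid.drop (sr + 1)).map String.toList) [sc] = true
instance (grid : List String) : Decidable (Pre_count_timelines_super_fast grid) := by
  unfold Pre_count_timelines_super_fast; infer_instance

def pvWitness_count_timelines_super_fast : List String := ["S.", ".^"]

def Spec_count_timelines_super_fast (grid : List String) (out : Int) : Prop := out = count_timelines_super_fast_alt grid
instance (grid : List String) (out : Int) : Decidable (Spec_count_timelines_super_fast grid out) := by unfold Spec_count_timelines_super_fast; infer_instance

-- ===== CLAIM (what is proved, stated in full; the proofs are below) =====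
def Claim_equal_count_timelines_super_fast : Prop := ∀ (grid : List String), Dom_count_timelines_super_fast grid → Pre_count_timelines_super_fast grid → Spec_count_timelines_super_fast grid (count_timelines_super_fast grid)

-- ===== LEMMAS AND PROOFS =====

-- the common semantic value: pvW cols rs c = number of timelines surviving when a
-- timeline is about to enter the first row of rs at column c
def pvW (cols : Nat) (rs : List String) : Nat → Int :=
  rs.foldr (fun ρ w c => ((pvTargets cols ρ.toList c).map w).sum) (fun _ => 1)

theorem pvW_nil (cols : Nat) (c : Nat) : pvW cols [] c = 1 := rfl

theorem pvW_cons (cols : Nat) (ρ : String) (rs : List String) (c : Nat) :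
    pvW cols (ρ :: rs) c = ((pvTargets cols ρ.toList c).map (pvW cols rs)).sum := rfl

-- ===== A-side: dict sweep = pvW =====

def pvWD (d : PySem.Dict Int Int) (w : Nat → Int) : Int :=
  (d.items.map (fun p => p.2 * w p.1.toNat)).sum

theorem pvWD_one (d : PySem.Dict Int Int) : pvWD d (fun _ => 1) = d.values.sum := by
  simp [pvWD, PySem.Dict.values]

theorem pvWD_empty (w : Nat → Int) : pvWD PySem.Dict.empty w = 0 := rfl

theorem sum_map_update {l : List Int} {t t' : Int → Int} {a : Int}
    (hnd : l.Nodup) (ha : a ∈ l) (hoff : ∀ b ∈ l, b ≠ a → t' b = t b) :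
    (l.map t').sum = (l.map t).sum + (t' a - t a) := by
  induction l with
  | nil => simp at ha
  | cons x xs ih =>
    rcases List.mem_cons.mp ha with rfl | ha'
    · have : xs.map t' = xs.map t := by
        apply List.map_congr_left
        intro b hb
        exact hoff b (List.mem_cons_of_mem _ hb) (fun h => (List.nodup_cons.mp hnd).1 (h ▸ hb))
      simp [this]; ring
    · have hx : t' x = t x := hoff x List.mem_cons_self (fun h => (List.nodup_cons.mp hnd).1 (h ▸ ha'))
      have := ih (List.nodup_cons.mp hnd).2 ha' (fun b hb hba => hoff b (List.mem_cons_of_mem _ hb) hba)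
      simp [hx, this]; ring

theorem pvWD_eq_keys_sum (d : PySem.Dict Int Int) (hnd : d.keys.Nodup) (w : Nat → Int) :
    pvWD d w = (d.keys.map (fun k => d.getD k 0 * w k.toNat)).sum := by
  unfold pvWD
  rw [PySem.Dict.items_eq_map_keys d hnd 0, List.map_map]
  rfl

theorem nodup_keys_modify (d : PySem.Dict Int Int) (hnd : d.keys.Nodup) (k : Int) (f : Int → Int) :
    (d.modify k 0 f).keys.Nodup := by
  rw [PySem.Dict.keys_modify]
  by_cases h : d.contains k
  · rw [PySem.Dict.keys_insert_of_contains _ _ h]; exact hnd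
  · rw [PySem.Dict.keys_insert_of_not_contains _ _ (by simpa using h)]
    have hk : k ∉ d.keys := fun hk => by
      rw [(PySem.Dict.contains_iff_mem_keys d k).mpr hk] at h; exact h rfl
    simp only [List.nodup_append, List.nodup_singleton, true_and]
    refine ⟨hnd, ?_⟩
    intro a ha b hb
    simp only [List.mem_singleton] at hb
    subst hb
    exact fun heq => hk (heq ▸ ha)

theorem mem_keys_modify_iff (d : PySem.Dict Int Int) (k k' : Int) (f : Int → Int) :
    k' ∈ (d.modify k 0 f).keys ↔ k' = k ∨ k' ∈ d.keys := by
  rw [PySem.Dict.keys_modify]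
  exact PySem.Dict.mem_keys_insert _ _ _ _

theorem pvWD_modify (d : PySem.Dict Int Int) (hnd : d.keys.Nodup) (k v : Int) (w : Nat → Int) :
    pvWD (d.modify k 0 (· + v)) w = pvWD d w + v * w k.toNat := by
  have hnd' := nodup_keys_modify d hnd k (· + v)
  rw [pvWD_eq_keys_sum _ hnd' w, pvWD_eq_keys_sum _ hnd w]
  rw [PySem.Dict.keys_modify]
  by_cases h : d.contains k
  · rw [PySem.Dict.keys_insert_of_contains _ _ h]
    have hk : k ∈ d.keys := (PySem.Dict.contains_iff_mem_keys d k).mp h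
    rw [sum_map_update hnd hk (t := fun k' => d.getD k' 0 * w k'.toNat)
      (t' := fun k' => (d.modify k 0 (· + v)).getD k' 0 * w k'.toNat)
      (fun b _ hb => by simp only []; rw [PySem.Dict.getD_modify, if_neg hb])]
    rw [PySem.Dict.getD_modify, if_pos rfl]
    ring
  · rw [PySem.Dict.keys_insert_of_not_contains _ _ (by simpa using h)]
    rw [List.map_append, List.sum_append]
    have h1 : ∀ b ∈ d.keys, (d.modify k 0 (· + v)).getD b 0 = d.getD b 0 := by
      intro b hb
      rw [PySem.Dict.getD_modify, if_neg]
      intro heq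
      subst heq
      rw [(PySem.Dict.contains_iff_mem_keys d b).mpr hb] at h
      exact h rfl
    have h2 : (d.keys.map (fun k' => (d.modify k 0 (· + v)).getD k' 0 * w k'.toNat)) =
        (d.keys.map (fun k' => d.getD k' 0 * w k'.toNat)) :=
      List.map_congr_left (fun b hb => by rw [h1 b hb])
    rw [h2]
    have h3 : (d.modify k 0 (· + v)).getD k 0 = v := by
      rw [PySem.Dict.getD_modify, if_pos rfl, PySem.Dict.getD_of_not_contains _ _ (by simpa using h)]
      ring
    simp [h3]

-- the body of A's inner loop
def pvBodyA (cols : Int) (ρ : String) : PySem.Dict Int Int → Int × Int → PySem.Dict Int Int :=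
  fun next_line p =>
    if PySem.Str.pyGet? ρ p.1 = some '.' then next_line.modify p.1 0 (· + p.2)
    else if PySem.Str.pyGet? ρ p.1 = some '^' then
      (if p.1 + 1 < cols then
        (if p.1 - 1 ≥ 0 then next_line.modify (p.1 - 1) 0 (· + p.2) else next_line).modify (p.1 + 1) 0 (· + p.2)
      else (if p.1 - 1 ≥ 0 then next_line.modify (p.1 - 1) 0 (· + p.2) else next_line))
    else next_line

theorem pvBodyA_step (colsN : Nat) (ρ : String) (w : Nat → Int)
    (acc : PySem.Dict Int Int) (p : Int × Int)
    (hp0 : 0 ≤ p.1) (hlen : p.1.toNat < ρ.toList.length) (hnd : acc.keys.Nodup) :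
    (pvBodyA (colsN : Int) ρ acc p).keys.Nodup ∧
    (∀ k, k ∈ (pvBodyA (colsN : Int) ρ acc p).keys ↔
      k ∈ acc.keys ∨ (0 ≤ k ∧ k.toNat ∈ pvTargets colsN ρ.toList p.1.toNat)) ∧
    pvWD (pvBodyA (colsN : Int) ρ acc p) w =
      pvWD acc w + p.2 * ((pvTargets colsN ρ.toList p.1.toNat).map w).sum := by
  have hcell : PySem.Str.pyGet? ρ p.1 = some (ρ.toList[p.1.toNat]) := by
    rw [(by simp [PySem.Str.pyGet?] : PySem.Str.pyGet? ρ p.1 = PySem.List.pyGet? ρ.toList p.1),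
      PySem.List.pyGet?_eq_some_getElem ρ.toList hp0 (by omega)]
  have hgetD : ρ.toList.getD p.1.toNat ' ' = ρ.toList[p.1.toNat] := by
    simp [List.getD_eq_getElem?_getD, List.getElem?_eq_getElem hlen]
  unfold pvBodyA pvTargets
  rw [hcell, hgetD]
  by_cases hdot : ρ.toList[p.1.toNat] = '.'
  · rw [if_pos (by rw [hdot]), if_pos hdot]
    refine ⟨nodup_keys_modify acc hnd _ _, ?_, ?_⟩
    · intro k
      rw [mem_keys_modify_iff]
      constructor
      · rintro (rfl | hk)
        · exact Or.inr ⟨hp0, by simp⟩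
        · exact Or.inl hk
      · rintro (hk | ⟨hk0, hkt⟩)
        · exact Or.inr hk
        · simp only [List.mem_singleton] at hkt
          exact Or.inl (by omega)
    · rw [pvWD_modify acc hnd p.1 p.2 w]; simp
  · rw [if_neg (fun hh => hdot (Option.some.inj hh)), if_neg hdot]
    by_cases hcar : ρ.toList[p.1.toNat] = '^'
    · rw [if_pos (by rw [hcar]), if_pos hcar]
      have hm1 : (p.1 - 1).toNat = p.1.toNat - 1 := by omega
      have hq1 : (p.1 + 1).toNat = p.1.toNat + 1 := by omega
      by_cases hR : p.1 + 1 < (colsN : Int) <;> by_cases hL : p.1 - 1 ≥ 0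
      · rw [if_pos hR, if_pos hL,
          if_pos (by omega : 1 ≤ p.1.toNat), if_pos (by omega : p.1.toNat + 1 < colsN)]
        have nd1 := nodup_keys_modify acc hnd (p.1 - 1) (· + p.2)
        refine ⟨nodup_keys_modify _ nd1 _ _, ?_, ?_⟩
        · intro k
          rw [mem_keys_modify_iff, mem_keys_modify_iff]
          simp only [List.mem_append, List.mem_singleton]
          constructor
          · rintro (rfl | rfl | hk)
            · exact Or.inr ⟨by omega, Or.inr (by omega)⟩
            · exact Or.inr ⟨by omega, Or.inl (by omega)⟩
            · exact Or.inl hk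
          · rintro (hk | ⟨hk0, hkt | hkt⟩)
            · exact Or.inr (Or.inr hk)
            · exact Or.inr (Or.inl (by omega))
            · exact Or.inl (by omega)
        · rw [pvWD_modify _ nd1 _ _ w, pvWD_modify _ hnd _ _ w, hm1, hq1]
          simp; ring_nf
      · rw [if_pos hR, if_neg hL,
          if_neg (by omega : ¬ 1 ≤ p.1.toNat), if_pos (by omega : p.1.toNat + 1 < colsN)]
        refine ⟨nodup_keys_modify acc hnd _ _, ?_, ?_⟩
        · intro k
          rw [mem_keys_modify_iff]
          simp only [List.nil_append, List.mem_singleton]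
          constructor
          · rintro (rfl | hk)
            · exact Or.inr ⟨by omega, by omega⟩
            · exact Or.inl hk
          · rintro (hk | ⟨hk0, hkt⟩)
            · exact Or.inr hk
            · exact Or.inl (by omega)
        · rw [pvWD_modify _ hnd _ _ w, hq1]
          simp
      · rw [if_neg hR, if_pos hL,
          if_pos (by omega : 1 ≤ p.1.toNat), if_neg (by omega : ¬ p.1.toNat + 1 < colsN)]
        refine ⟨nodup_keys_modify acc hnd _ _, ?_, ?_⟩
        · intro k
          rw [mem_keys_modify_iff]
          simp only [List.append_nil, List.mem_singleton]
          constructor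
          · rintro (rfl | hk)
            · exact Or.inr ⟨by omega, by omega⟩
            · exact Or.inl hk
          · rintro (hk | ⟨hk0, hkt⟩)
            · exact Or.inr hk
            · exact Or.inl (by omega)
        · rw [pvWD_modify _ hnd _ _ w, hm1]
          simp
      · rw [if_neg hR, if_neg hL,
          if_neg (by omega : ¬ 1 ≤ p.1.toNat), if_neg (by omega : ¬ p.1.toNat + 1 < colsN)]
        refine ⟨hnd, ?_, by simp⟩
        intro k
        simp
    · rw [if_neg (fun hh => hcar (Option.some.inj hh)), if_neg hcar]
      refine ⟨hnd, ?_, by simp⟩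
      intro k
      simp

theorem pvInnerA (colsN : Nat) (ρ : String) (w : Nat → Int) :
    ∀ (l : List (Int × Int)) (acc : PySem.Dict Int Int),
      (∀ p ∈ l, 0 ≤ p.1 ∧ p.1.toNat < ρ.toList.length) → acc.keys.Nodup →
      (l.foldl (pvBodyA (colsN : Int) ρ) acc).keys.Nodup ∧
      (∀ k, k ∈ (l.foldl (pvBodyA (colsN : Int) ρ) acc).keys ↔
        k ∈ acc.keys ∨ (0 ≤ k ∧ ∃ p ∈ l, k.toNat ∈ pvTargets colsN ρ.toList p.1.toNat)) ∧
      pvWD (l.foldl (pvBodyA (colsN : Int) ρ) acc) w =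
        pvWD acc w + (l.map (fun p => p.2 * ((pvTargets colsN ρ.toList p.1.toNat).map w).sum)).sum := by
  intro l
  induction l with
  | nil =>
    intro acc _ hnd
    refine ⟨hnd, ?_, by simp⟩
    intro k; simp
  | cons p l ih =>
    intro acc hl hnd
    obtain ⟨hp0, hplen⟩ := hl p List.mem_cons_self
    obtain ⟨nd1, mem1, w1⟩ := pvBodyA_step colsN ρ w acc p hp0 hplen hnd
    obtain ⟨nd2, mem2, w2⟩ := ih (pvBodyA (colsN : Int) ρ acc p)
      (fun q hq => hl q (List.mem_cons_of_mem _ hq)) nd1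
    refine ⟨nd2, ?_, ?_⟩
    · intro k
      simp only [List.foldl_cons]
      rw [mem2, mem1]
      constructor
      · rintro ((hk | ⟨hk0, hkt⟩) | ⟨hk0, q, hq, hkt⟩)
        · exact Or.inl hk
        · exact Or.inr ⟨hk0, p, List.mem_cons_self, hkt⟩
        · exact Or.inr ⟨hk0, q, List.mem_cons_of_mem _ hq, hkt⟩
      · rintro (hk | ⟨hk0, q, hq, hkt⟩)
        · exact Or.inl (Or.inl hk)
        · rcases List.mem_cons.mp hq with rfl | hq'
          · exact Or.inl (Or.inr ⟨hk0, hkt⟩)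
          · exact Or.inr ⟨hk0, q, hq', hkt⟩
    · simp only [List.foldl_cons, List.map_cons, List.sum_cons]
      rw [w2, w1]
      ring

-- A's outer loop body
def pvBodyAOuter (grid : List String) (cols : Int) :
    PySem.Dict Int Int → Int → PySem.Dict Int Int :=
  fun current r => current.items.foldl (pvBodyA cols (PySem.List.pyGetD grid r "")) PySem.Dict.empty

theorem pvOuterA (grid : List String) (colsN : Nat) :
    ∀ (n : Nat) (a : Int) (S : List Nat) (d : PySem.Dict Int Int),
      (grid.length : Int) - a = n → 0 ≤ a →
      pvReach colsN ((grid.drop a.toNat).map String.toList) S = true →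
      d.keys.Nodup → (∀ k, k ∈ d.keys ↔ 0 ≤ k ∧ k.toNat ∈ S) →
      ((PySem.List.pyRange a (grid.length : Int) 1).foldl (pvBodyAOuter grid (colsN : Int)) d).values.sum =
        pvWD d (pvW colsN (grid.drop a.toNat)) := by
  intro n
  induction n with
  | zero =>
    intro a S d ha h0 hreach hnd hmem
    rw [PySem.List.pyRange_one_eq_nil (by omega)]
    rw [List.drop_eq_nil_of_le (by omega)]
    simp only [List.foldl_nil]
    rw [show pvW colsN [] = fun _ => 1 from rfl, pvWD_one]
  | succ n ih =>
    intro a S d ha h0 hreach hnd hmem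
    rw [PySem.List.pyRange_one_cons (by omega)]
    simp only [List.foldl_cons]
    have hanat : a.toNat < grid.length := by omega
    have hget : PySem.List.pyGetD grid a "" = grid[a.toNat] :=
      PySem.List.pyGetD_eq_getElem grid "" h0 (by omega)
    -- unpack pvReach on the cons
    rw [List.drop_eq_getElem_cons hanat] at hreach
    simp only [List.map_cons] at hreach
    rw [show pvReach colsN ((grid[a.toNat]).toList :: (grid.drop (a.toNat + 1)).map String.toList) S =
        (S.all (fun c => decide (c < (grid[a.toNat]).toList.length)) &&
          pvReach colsN ((grid.drop (a.toNat + 1)).map String.toList)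
            (PySem.List.dedup (S.flatMap (pvTargets colsN (grid[a.toNat]).toList)))) from rfl] at hreach
    rw [Bool.and_eq_true] at hreach
    obtain ⟨hall, hreach'⟩ := hreach
    have hinrange : ∀ c ∈ S, c < (grid[a.toNat]).toList.length := by
      intro c hc
      have := List.all_eq_true.mp hall c hc
      simpa using this
    have hitems : ∀ p ∈ d.items, 0 ≤ p.1 ∧ p.1.toNat < (grid[a.toNat]).toList.length := by
      intro p hp
      have hk : p.1 ∈ d.keys := List.mem_map_of_mem hp
      obtain ⟨hk0, hkS⟩ := (hmem p.1).mp hk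
      exact ⟨hk0, hinrange _ hkS⟩
    obtain ⟨nd', mem', w'⟩ := pvInnerA colsN grid[a.toNat]
      (pvW colsN (grid.drop (a.toNat + 1))) d.items PySem.Dict.empty hitems
      (by simp [PySem.Dict.keys_empty])
    have hbody : pvBodyAOuter grid (colsN : Int) d a =
        d.items.foldl (pvBodyA (colsN : Int) grid[a.toNat]) PySem.Dict.empty := by
      unfold pvBodyAOuter; rw [hget]
    rw [hbody]
    rw [ih (a + 1) (PySem.List.dedup (S.flatMap (pvTargets colsN (grid[a.toNat]).toList))) _
      (by omega) (by omega)
      (by rw [show (a + 1).toNat = a.toNat + 1 by omega]; exact hreach') nd'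
      (by
        intro k
        rw [mem' k]
        simp only [PySem.Dict.keys_empty, List.not_mem_nil, false_or]
        rw [PySem.List.mem_dedup, List.mem_flatMap]
        constructor
        · rintro ⟨hk0, q, hq, hkt⟩
          have hqk : q.1 ∈ d.keys := List.mem_map_of_mem hq
          obtain ⟨_, hqS⟩ := (hmem q.1).mp hqk
          exact ⟨hk0, q.1.toNat, hqS, hkt⟩
        · rintro ⟨hk0, c, hcS, hkt⟩
          have hck : ((c : Nat) : Int) ∈ d.keys := (hmem _).mpr ⟨by omega, by simpa using hcS⟩
          obtain ⟨q, hq, hq1⟩ := List.mem_map.mp hck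
          refine ⟨hk0, q, hq, ?_⟩
          rw [show q.1.toNat = c from by omega]
          exact hkt)]
    rw [show (a + 1).toNat = a.toNat + 1 by omega]
    rw [w', pvWD_empty]
    rw [List.drop_eq_getElem_cons hanat]
    unfold pvWD
    rw [zero_add]
    refine congrArg List.sum (List.map_congr_left ?_)
    intro p hp
    rw [pvW_cons]

-- ===== B-side: layers + backward pass = pvW =====

-- the Int-valued target list B's pass 1 computes for an in-range cell
def pvTsInt (cols : Int) (row : List Char) (c : Int) : List Int :=
  if row.getD c.toNat ' ' = '.' then [c]
  else if row.getD c.toNat ' ' = '^' then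
    (if c - 1 ≥ 0 then [c - 1] else []) ++ (if c + 1 < cols then [c + 1] else [])
  else []

theorem pvTsInt_nonneg (cols : Int) (row : List Char) (c : Int) (hc : 0 ≤ c) :
    ∀ t ∈ pvTsInt cols row c, 0 ≤ t := by
  intro t ht
  unfold pvTsInt at ht
  split_ifs at ht <;> simp_all <;> omega

theorem pvTsInt_toNat (colsN : Nat) (row : List Char) (c : Int) (hc : 0 ≤ c) :
    (pvTsInt (colsN : Int) row c).map Int.toNat = pvTargets colsN row c.toNat := by
  unfold pvTsInt pvTargets
  by_cases h1 : row.getD c.toNat ' ' = '.'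
  · rw [if_pos h1, if_pos h1]; simp
  · rw [if_neg h1, if_neg h1]
    by_cases h2 : row.getD c.toNat ' ' = '^'
    · rw [if_pos h2, if_pos h2, List.map_append]
      congr 1
      · by_cases hL : c - 1 ≥ 0
        · rw [if_pos hL, if_pos (by omega : 1 ≤ c.toNat)]
          simp only [List.map_cons, List.map_nil]
          congr 1
          omega
        · rw [if_neg hL, if_neg (by omega : ¬ 1 ≤ c.toNat)]
          rfl
      · by_cases hR : c + 1 < (colsN : Int)
        · rw [if_pos hR, if_pos (by omega : c.toNat + 1 < colsN)]
          simp only [List.map_cons, List.map_nil]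
          congr 1
          omega
        · rw [if_neg hR, if_neg (by omega : ¬ c.toNat + 1 < colsN)]
          rfl
    · rw [if_neg h2, if_neg h2]
      rfl

-- the target list as B's pass-1 code computes it
def pvTsB (cols : Int) (ρ : String) (c : Int) : List Int :=
  if PySem.Str.pyGet? ρ c = some '.' then [c]
  else if PySem.Str.pyGet? ρ c = some '^' then
    (if c - 1 ≥ 0 then [c - 1] else []) ++ (if c + 1 < cols then [c + 1] else [])
  else []

theorem pvTsB_eq (cols : Int) (ρ : String) (c : Int) (hc : 0 ≤ c)
    (hlen : c.toNat < ρ.toList.length) :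
    pvTsB cols ρ c = pvTsInt cols ρ.toList c := by
  have hcell : PySem.Str.pyGet? ρ c = some (ρ.toList[c.toNat]) := by
    rw [(by simp [PySem.Str.pyGet?] : PySem.Str.pyGet? ρ c = PySem.List.pyGet? ρ.toList c),
      PySem.List.pyGet?_eq_some_getElem ρ.toList hc (by omega)]
  have hgetD : ρ.toList.getD c.toNat ' ' = ρ.toList[c.toNat] := by
    simp [List.getD_eq_getElem?_getD, List.getElem?_eq_getElem hlen]
  unfold pvTsB pvTsInt
  rw [hcell, hgetD]
  simp only [Option.some.injEq]

-- the body of B's pass-1 inner loop over the frontier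
def pvBodyB (cols : Int) (ρ : String) :
    List (Int × List Int) × PySem.Set Int → Int → List (Int × List Int) × PySem.Set Int :=
  fun lf c => (lf.1 ++ [(c, pvTsB cols ρ c)], PySem.Set.update lf.2 (pvTsB cols ρ c))

theorem pvInnerB (cols : Int) (ρ : String) :
    ∀ (cs : List Int) (accL : List (Int × List Int)) (accS : PySem.Set Int),
      (∀ c ∈ cs, 0 ≤ c ∧ c.toNat < ρ.toList.length) → accS.Nodup →
      (cs.foldl (pvBodyB cols ρ) (accL, accS)).1 =
        accL ++ cs.map (fun c => (c, pvTsInt cols ρ.toList c)) ∧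
      (cs.foldl (pvBodyB cols ρ) (accL, accS)).2.Nodup ∧
      (∀ k, k ∈ (cs.foldl (pvBodyB cols ρ) (accL, accS)).2 ↔
        k ∈ accS ∨ ∃ c ∈ cs, k ∈ pvTsInt cols ρ.toList c) := by
  intro cs
  induction cs with
  | nil =>
    intro accL accS _ hnd
    refine ⟨by simp, hnd, ?_⟩
    intro k; simp
  | cons c cs ih =>
    intro accL accS hcs hnd
    obtain ⟨hc0, hclen⟩ := hcs c List.mem_cons_self
    simp only [List.foldl_cons]
    rw [show pvBodyB cols ρ (accL, accS) c =
        (accL ++ [(c, pvTsInt cols ρ.toList c)], PySem.Set.update accS (pvTsInt cols ρ.toList c)) from by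
      unfold pvBodyB; rw [pvTsB_eq cols ρ c hc0 hclen]]
    obtain ⟨h1, h2, h3⟩ := ih (accL ++ [(c, pvTsInt cols ρ.toList c)])
      (PySem.Set.update accS (pvTsInt cols ρ.toList c))
      (fun c' hc' => hcs c' (List.mem_cons_of_mem _ hc'))
      (PySem.Set.nodup_update _ _ hnd)
    refine ⟨by rw [h1]; simp, h2, ?_⟩
    intro k
    rw [h3 k, PySem.Set.mem_update]
    constructor
    · rintro ((hk | hk) | ⟨c', hc', hk⟩)
      · exact Or.inl hk
      · exact Or.inr ⟨c, List.mem_cons_self, hk⟩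
      · exact Or.inr ⟨c', List.mem_cons_of_mem _ hc', hk⟩
    · rintro (hk | ⟨c', hc', hk⟩)
      · exact Or.inl (Or.inl hk)
      · rcases List.mem_cons.mp hc' with rfl | hc''
        · exact Or.inl (Or.inr hk)
        · exact Or.inr ⟨c', hc'', hk⟩

-- B's pass-1 outer loop body
def pvBodyBOuter (grid : List String) (cols : Int) :
    List (List (Int × List Int)) × PySem.Set Int → Int → List (List (Int × List Int)) × PySem.Set Int :=
  fun st r =>
    let lf := st.2.foldl (pvBodyB cols (PySem.List.pyGetD grid r "")) ([], PySem.Set.ofList [])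
    (st.1 ++ [lf.1], lf.2)

-- coherence of a recorded layer list from row a with entering frontier S
def pvCoh (grid : List String) (colsN : Nat) : Int → List Nat → List (List (Int × List Int)) → Prop
  | a, _, [] => (grid.length : Int) ≤ a ∧ 0 ≤ a
  | a, S, layer :: rest =>
      0 ≤ a ∧ a < (grid.length : Int) ∧
      (layer.map Prod.fst).Nodup ∧
      (∀ k : Int, k ∈ layer.map Prod.fst ↔ 0 ≤ k ∧ k.toNat ∈ S) ∧
      (∀ p ∈ layer, 0 ≤ p.1 ∧ (∀ t ∈ p.2, 0 ≤ t) ∧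
        p.2.map Int.toNat = pvTargets colsN (pvRow grid a.toNat) p.1.toNat) ∧
      pvCoh grid colsN (a + 1)
        (PySem.List.dedup (S.flatMap (pvTargets colsN (pvRow grid a.toNat)))) rest

theorem pvPhase1 (grid : List String) (colsN : Nat) :
    ∀ (n : Nat) (a : Int) (S : List Nat) (F : PySem.Set Int) (Ls : List (List (Int × List Int))),
      (grid.length : Int) - a = n → 0 ≤ a →
      pvReach colsN ((grid.drop a.toNat).map String.toList) S = true →
      F.Nodup → (∀ k : Int, k ∈ F ↔ 0 ≤ k ∧ k.toNat ∈ S) →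
      ∃ L' F', (PySem.List.pyRange a (grid.length : Int) 1).foldl (pvBodyBOuter grid (colsN : Int)) (Ls, F) = (Ls ++ L', F') ∧
        pvCoh grid colsN a S L' := by
  intro n
  induction n with
  | zero =>
    intro a S F Ls ha h0 hreach hnd hmem
    refine ⟨[], F, ?_, by exact ⟨by omega, h0⟩⟩
    rw [PySem.List.pyRange_one_eq_nil (by omega)]
    simp
  | succ n ih =>
    intro a S F Ls ha h0 hreach hnd hmem
    rw [PySem.List.pyRange_one_cons (by omega)]
    simp only [List.foldl_cons]
    have hanat : a.toNat < grid.length := by omega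
    have hget : PySem.List.pyGetD grid a "" = grid[a.toNat] :=
      PySem.List.pyGetD_eq_getElem grid "" h0 (by omega)
    rw [List.drop_eq_getElem_cons hanat] at hreach
    simp only [List.map_cons] at hreach
    rw [show pvReach colsN ((grid[a.toNat]).toList :: (grid.drop (a.toNat + 1)).map String.toList) S =
        (S.all (fun c => decide (c < (grid[a.toNat]).toList.length)) &&
          pvReach colsN ((grid.drop (a.toNat + 1)).map String.toList)
            (PySem.List.dedup (S.flatMap (pvTargets colsN (grid[a.toNat]).toList)))) from rfl] at hreach
    rw [Bool.and_eq_true] at hreach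
    obtain ⟨hall, hreach'⟩ := hreach
    have hinrange : ∀ c ∈ S, c < (grid[a.toNat]).toList.length := by
      intro c hc
      have := List.all_eq_true.mp hall c hc
      simpa using this
    have hFrange : ∀ c ∈ F, 0 ≤ c ∧ c.toNat < (grid[a.toNat]).toList.length := by
      intro c hc
      obtain ⟨hc0, hcS⟩ := (hmem c).mp hc
      exact ⟨hc0, hinrange _ hcS⟩
    obtain ⟨hL, hSnd, hSmem⟩ := pvInnerB (colsN : Int) grid[a.toNat] F [] (PySem.Set.ofList []) hFrange
      (by simp [PySem.Set.ofList])
    have hrow : pvRow grid a.toNat = (grid[a.toNat]).toList := by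
      simp [pvRow, List.getD_eq_getElem?_getD, List.getElem?_eq_getElem hanat]
    have hbody : pvBodyBOuter grid (colsN : Int) (Ls, F) a =
        (Ls ++ [(F.foldl (pvBodyB (colsN : Int) grid[a.toNat]) ([], PySem.Set.ofList [])).1],
         (F.foldl (pvBodyB (colsN : Int) grid[a.toNat]) ([], PySem.Set.ofList [])).2) := by
      unfold pvBodyBOuter
      rw [hget]
    rw [hbody]
    -- the new frontier's key-set invariant
    have hmem' : ∀ k : Int, k ∈ (F.foldl (pvBodyB (colsN : Int) grid[a.toNat]) ([], PySem.Set.ofList [])).2 ↔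
        0 ≤ k ∧ k.toNat ∈ PySem.List.dedup (S.flatMap (pvTargets colsN (grid[a.toNat]).toList)) := by
      intro k
      rw [hSmem k]
      rw [show (PySem.Set.ofList ([] : List Int)) = ([] : List Int) from rfl]
      simp only [List.not_mem_nil, false_or]
      rw [PySem.List.mem_dedup, List.mem_flatMap]
      constructor
      · rintro ⟨c, hcF, hk⟩
        obtain ⟨hc0, hcS⟩ := (hmem c).mp hcF
        have h0k : 0 ≤ k := pvTsInt_nonneg _ _ _ hc0 k hk
        refine ⟨h0k, c.toNat, hcS, ?_⟩
        rw [← pvTsInt_toNat colsN (grid[a.toNat]).toList c hc0]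
        exact List.mem_map_of_mem hk
      · rintro ⟨hk0, cN, hcS, hk⟩
        have hcF : ((cN : Nat) : Int) ∈ F := (hmem _).mpr ⟨by omega, by simpa using hcS⟩
        refine ⟨(cN : Int), hcF, ?_⟩
        have hk2 : k.toNat ∈ (pvTsInt (colsN : Int) (grid[a.toNat]).toList (cN : Int)).map Int.toNat := by
          rw [pvTsInt_toNat colsN (grid[a.toNat]).toList (cN : Int) (by omega)]
          simpa using hk
        obtain ⟨t, ht, htk⟩ := List.mem_map.mp hk2
        have ht0 : 0 ≤ t := pvTsInt_nonneg _ _ _ (by omega) t ht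
        rw [show k = t from by omega]
        exact ht
    obtain ⟨L', F', hfold, hcoh⟩ := ih (a + 1)
      (PySem.List.dedup (S.flatMap (pvTargets colsN (grid[a.toNat]).toList)))
      (F.foldl (pvBodyB (colsN : Int) grid[a.toNat]) ([], PySem.Set.ofList [])).2
      (Ls ++ [(F.foldl (pvBodyB (colsN : Int) grid[a.toNat]) ([], PySem.Set.ofList [])).1])
      (by omega) (by omega)
      (by rw [show (a + 1).toNat = a.toNat + 1 by omega]; exact hreach')
      hSnd hmem'
    refine ⟨(F.foldl (pvBodyB (colsN : Int) grid[a.toNat]) ([], PySem.Set.ofList [])).1 :: L', F', ?_, ?_⟩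
    · rw [hfold]
      simp
    · refine ⟨h0, by omega, ?_, ?_, ?_, ?_⟩
      · rw [hL]
        simp only [List.nil_append, List.map_map]
        simpa [Function.comp_def] using hnd
      · intro k
        rw [hL]
        simp only [List.nil_append, List.map_map, Function.comp_def]
        simpa using hmem k
      · intro p hp
        rw [hL] at hp
        simp only [List.nil_append] at hp
        obtain ⟨c, hcF, rfl⟩ := List.mem_map.mp hp
        obtain ⟨hc0, _⟩ := hFrange c hcF
        refine ⟨hc0, pvTsInt_nonneg _ _ _ hc0, ?_⟩
        rw [hrow]
        exact pvTsInt_toNat colsN (grid[a.toNat]).toList c hc0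
      · rw [hrow]
        exact hcoh

-- pass 2: one layer step of B's backward loop
def pvLayerStep (w : PySem.Dict Int Int) (layer : List (Int × List Int)) : PySem.Dict Int Int :=
  layer.foldl (fun nw (p : Int × List Int) =>
    nw.insert p.1 ((p.2.map (fun t => w.getD t 1)).sum)) PySem.Dict.empty

theorem getD_foldl_insert_absent (w : PySem.Dict Int Int) (k d : Int) :
    ∀ (l : List (Int × List Int)) (nw : PySem.Dict Int Int), (∀ p ∈ l, p.1 ≠ k) →
      (l.foldl (fun nw (p : Int × List Int) =>
        nw.insert p.1 ((p.2.map (fun t => w.getD t 1)).sum)) nw).getD k d = nw.getD k d := by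
  intro l
  induction l with
  | nil => intro nw _; rfl
  | cons p l ih =>
    intro nw h
    simp only [List.foldl_cons]
    rw [ih _ (fun q hq => h q (List.mem_cons_of_mem _ hq))]
    rw [PySem.Dict.getD_insert]
    exact if_neg (fun hh : k = p.1 => h p List.mem_cons_self hh.symm)

theorem getD_pvLayerStep (w : PySem.Dict Int Int) (d : Int) :
    ∀ (layer : List (Int × List Int)) (nw : PySem.Dict Int Int) (p : Int × List Int),
      (layer.map Prod.fst).Nodup → p ∈ layer →
      (layer.foldl (fun nw (p : Int × List Int) =>
        nw.insert p.1 ((p.2.map (fun t => w.getD t 1)).sum)) nw).getD p.1 d =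
        (p.2.map (fun t => w.getD t 1)).sum := by
  intro layer
  induction layer with
  | nil => intro nw p _ hp; simp at hp
  | cons q layer ih =>
    intro nw p hnd hp
    simp only [List.map_cons, List.nodup_cons] at hnd
    obtain ⟨hq, hnd'⟩ := hnd
    simp only [List.foldl_cons]
    rcases List.mem_cons.mp hp with rfl | hp'
    · rw [getD_foldl_insert_absent w p.1 d layer _
        (fun r hr hrk => hq (hrk ▸ List.mem_map_of_mem hr))]
      rw [PySem.Dict.getD_insert, if_pos rfl]
    · exact ih _ p hnd' hp'

theorem pvPhase2 (grid : List String) (colsN : Nat) :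
    ∀ (L : List (List (Int × List Int))) (a : Int) (S : List Nat),
      pvCoh grid colsN a S L →
      ∀ t : Int, 0 ≤ t → t.toNat ∈ S →
        (L.reverse.foldl pvLayerStep PySem.Dict.empty).getD t 1 = pvW colsN (grid.drop a.toNat) t.toNat := by
  intro L
  induction L with
  | nil =>
    intro a S hcoh t ht0 htS
    obtain ⟨hlen, h0⟩ := hcoh
    rw [List.drop_eq_nil_of_le (by omega)]
    simp [pvW_nil, PySem.Dict.getD_empty]
  | cons layer rest ih =>
    intro a S hcoh t ht0 htS
    obtain ⟨h0, hlt, hnd, hmem, hts, hcoh'⟩ := hcoh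
    have hanat : a.toNat < grid.length := by omega
    simp only [List.reverse_cons, List.foldl_append, List.foldl_cons, List.foldl_nil]
    set wr := rest.reverse.foldl pvLayerStep PySem.Dict.empty with hwr
    -- t is a key of this layer
    have htkey : t ∈ layer.map Prod.fst := (hmem t).mpr ⟨ht0, htS⟩
    obtain ⟨p, hp, hpt⟩ := List.mem_map.mp htkey
    obtain ⟨hp0, hp2nn, hp2⟩ := hts p hp
    have hstep : (pvLayerStep wr layer).getD t 1 = (p.2.map (fun t => wr.getD t 1)).sum := by
      rw [← hpt]
      exact getD_pvLayerStep wr 1 layer PySem.Dict.empty p hnd hp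
    rw [hstep]
    -- each target's weight is given by the IH (or is 1 = pvW [] when rest is empty)
    have hwrval : ∀ t' ∈ p.2, wr.getD t' 1 = pvW colsN (grid.drop (a.toNat + 1)) t'.toNat := by
      intro t' ht'
      have ht'0 : 0 ≤ t' := hp2nn t' ht'
      have ht'S : t'.toNat ∈ PySem.List.dedup (S.flatMap (pvTargets colsN (pvRow grid a.toNat))) := by
        rw [PySem.List.mem_dedup, List.mem_flatMap]
        refine ⟨p.1.toNat, (hmem p.1).mp (hpt ▸ htkey) |>.2, ?_⟩
        rw [← hp2]
        exact List.mem_map_of_mem ht'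
      have := ih (a + 1) _ hcoh' t' ht'0 ht'S
      rwa [show (a + 1).toNat = a.toNat + 1 from by omega] at this
    rw [List.drop_eq_getElem_cons hanat, pvW_cons]
    have hrow : (grid[a.toNat]).toList = pvRow grid a.toNat := by
      simp [pvRow, List.getD_eq_getElem?_getD, List.getElem?_eq_getElem hanat]
    rw [hrow, ← hpt, ← hp2]
    rw [List.map_map]
    refine congrArg List.sum (List.map_congr_left ?_)
    intro t' ht'
    simpa using hwrval t' ht'

-- ===== find_start returns the first 'S' (row-major) =====

theorem pvFindInner (l : List Char) : ∀ (s : Int) (sc : Nat), ∀ (hsc : sc < l.length),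
    l[sc] = 'S' → (∀ j < sc, l[j]? ≠ some 'S') →
    (PySem.List.enumerate l s).find? (fun q => q.2 == 'S') = some (s + sc, l[sc]) := by
  induction l with
  | nil =>
    intro s sc hsc
    simp at hsc
  | cons x xs ih =>
    intro s sc hsc hS hprev
    cases sc with
    | zero =>
      rw [PySem.List.enumerate_cons]
      rw [List.find?_cons_of_pos (by simp only [List.getElem_cons_zero] at hS; simp [hS])]
      simp
    | succ sc' =>
      have hx : x ≠ 'S' := by
        have := hprev 0 (by omega)
        simpa using this
      rw [PySem.List.enumerate_cons]
      rw [List.find?_cons_of_neg (by simp [hx])]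
      rw [ih (s + 1) sc' (by simpa using hsc) (by simpa using hS)
        (fun j hj => by
          have := hprev (j + 1) (by omega)
          simpa using this)]
      congr 2
      push_cast
      ring

theorem pvFindOuterAux :
    ∀ (grid : List String) (s : Int) (sr sc : Nat), ∀ (hsr : sr < grid.length),
    ∀ (hsc : sc < (grid[sr]).toList.length),
    (grid[sr]).toList[sc] = 'S' →
    (∀ i < sr, ∀ (hi : i < grid.length), 'S' ∉ (grid[i]).toList) →
    (∀ j < sc, ((grid[sr]).toList)[j]? ≠ some 'S') →
    (PySem.List.enumerate grid s).findSome? (fun p =>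
        ((PySem.List.enumerate p.2.toList 0).find? (fun q => q.2 == 'S')).map
          (fun q => (p.1, q.1))) = some (s + sr, (0 : Int) + sc) := by
  intro grid
  induction grid with
  | nil =>
    intro s sr sc hsr
    simp at hsr
  | cons ρ rest ih =>
    intro s sr sc hsr hsc hS hprevr hprevc
    rw [PySem.List.enumerate_cons]
    cases sr with
    | zero =>
      rw [List.findSome?_cons]
      have hfind := pvFindInner ρ.toList 0 sc hsc hS hprevc
      simp only [hfind, Option.map_some]
      simp
    | succ sr' =>
      rw [List.findSome?_cons]
      have hnone : ((PySem.List.enumerate ρ.toList 0).find? (fun q => q.2 == 'S')) = none := by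
        rw [List.find?_eq_none]
        intro q hq
        obtain ⟨k, hk, rfl⟩ := (PySem.List.mem_enumerate_iff _ 0 q).mp hq
        have hm : ρ.toList[k] ∈ ρ.toList := List.getElem_mem hk
        have hmem := hprevr 0 (by omega) (by omega)
        simp only at hmem ⊢
        simp only [beq_iff_eq]
        intro hcon
        exact hmem (hcon ▸ hm)
      simp only [hnone, Option.map_none]
      rw [ih (s + 1) sr' sc (by simpa using hsr) (by simpa using hsc) (by simpa using hS)
        (fun i hi hi2 => by
          have := hprevr (i + 1) (by omega) (by omega)
          simpa using this)
        (by simpa using hprevc)]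
      congr 2
      push_cast
      ring

theorem pvFindStart_first (grid : List String) (sr sc : Nat)
    (hsr : sr < grid.length) (hsc : sc < (grid[sr]).toList.length)
    (hS : (grid[sr]).toList[sc] = 'S')
    (hprevr : ∀ i < sr, ∀ (hi : i < grid.length), 'S' ∉ (grid[i]).toList)
    (hprevc : ∀ j < sc, ((grid[sr]).toList)[j]? ≠ some 'S') :
    pvFindStart grid = some ((sr : Int), (sc : Int)) := by
  unfold pvFindStart
  rw [pvFindOuterAux grid 0 sr sc hsr hsc hS hprevr hprevc]
  simp

theorem pvRow_eq (grid : List String) (r : Nat) (hr : r < grid.length) :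
    pvRow grid r = (grid[r]).toList := by
  simp [pvRow, List.getD_eq_getElem?_getD, List.getElem?_eq_getElem hr]

-- ===== main equivalence =====

theorem pv_main (grid : List String)
    (hpre : Pre_count_timelines_super_fast grid) :
    count_timelines_super_fast grid = count_timelines_super_fast_alt grid := by
  obtain ⟨hne, sr, hsr, sc, hsc, hS, hprevr, hprevc, hreach⟩ := hpre
  rw [pvRow_eq grid sr hsr] at hsc hS hprevc
  have hSg : (grid[sr]).toList[sc] = 'S' := by
    rw [← hS]
    simp [List.getD_eq_getElem?_getD, List.getElem?_eq_getElem hsc]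
  have hprevc' : ∀ j < sc, ((grid[sr]).toList)[j]? ≠ some 'S' := by
    intro j hj heq
    have := hprevc j hj
    rw [List.getD_eq_getElem?_getD] at this
    exact this (by rw [heq]; rfl)
  have hprevr' : ∀ i < sr, ∀ (hi : i < grid.length), 'S' ∉ (grid[i]).toList := by
    intro i hi hi2
    have := hprevr i hi
    rwa [pvRow_eq grid i hi2] at this
  have hfs : pvFindStart grid = some ((sr : Int), (sc : Int)) :=
    pvFindStart_first grid sr sc hsr hsc hSg hprevr' hprevc'
  have hcols : (PySem.List.pyGetD grid 0 "").toList.length = (pvRow grid 0).length := by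
    rw [PySem.List.pyGetD_zero]
    rfl
  unfold count_timelines_super_fast count_timelines_super_fast_alt
  rw [hfs]
  show ((PySem.List.pyRange ((sr : Int) + 1) (grid.length : Int) 1).foldl
      (pvBodyAOuter grid (((PySem.List.pyGetD grid 0 "").toList.length : Nat) : Int))
      (PySem.Dict.empty.insert (sc : Int) 1)).values.sum =
    (((PySem.List.pyRange ((sr : Int) + 1) (grid.length : Int) 1).foldl
        (pvBodyBOuter grid (((PySem.List.pyGetD grid 0 "").toList.length : Nat) : Int))
        ([], PySem.Set.ofList [(sc : Int)])).1.reverse.foldl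
      pvLayerStep PySem.Dict.empty).getD (sc : Int) 1
  rw [hcols]
  have hkeys : (PySem.Dict.empty.insert (sc : Int) (1 : Int)).keys = [(sc : Int)] := by
    rw [PySem.Dict.keys_insert_of_not_contains _ _ (by simp)]
    simp [PySem.Dict.keys_empty]
  have hmem1 : ∀ k : Int, k ∈ [(sc : Int)] ↔ 0 ≤ k ∧ k.toNat ∈ [sc] := by
    intro k
    simp only [List.mem_singleton]
    constructor
    · rintro rfl; exact ⟨by omega, by omega⟩
    · rintro ⟨h1, h2⟩; omega
  have hreach' : pvReach (pvRow grid 0).length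
      ((grid.drop ((sr : Int) + 1).toNat).map String.toList) [sc] = true := by
    rw [show ((sr : Int) + 1).toNat = sr + 1 from by omega]
    exact hreach
  -- A side
  rw [pvOuterA grid (pvRow grid 0).length (((grid.length : Int) - ((sr : Int) + 1)).toNat)
    ((sr : Int) + 1) [sc] _ (by omega) (by omega) hreach'
    (by rw [hkeys]; simp)
    (by rw [hkeys]; exact hmem1)]
  -- B side
  obtain ⟨L', F', hfold, hcoh⟩ := pvPhase1 grid (pvRow grid 0).length
    (((grid.length : Int) - ((sr : Int) + 1)).toNat) ((sr : Int) + 1) [sc]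
    (PySem.Set.ofList [(sc : Int)]) [] (by omega) (by omega) hreach'
    (by simp [PySem.Set.ofList, PySem.Set.add])
    (by
      intro k
      rw [show PySem.Set.ofList [(sc : Int)] = [(sc : Int)] from rfl]
      exact hmem1 k)
  rw [hfold]
  simp only [List.nil_append]
  rw [pvPhase2 grid (pvRow grid 0).length L' ((sr : Int) + 1) [sc] hcoh (sc : Int)
    (by omega) (by simp)]
  rw [show ((sr : Int) + 1).toNat = sr + 1 from by omega]
  -- both sides are pvW … sc
  have hitems : (PySem.Dict.empty.insert (sc : Int) (1 : Int)).items = [((sc : Int), 1)] := by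
    rw [PySem.Dict.items_insert_of_not_contains _ _ (by simp)]
    rfl
  rw [show ((sc : Int)).toNat = sc from by omega]
  simp [pvWD, hitems]

-- ===== VERDICT (by name: the statement is the Claim_ definition above) =====
theorem count_timelines_super_fast_spec : Claim_equal_count_timelines_super_fast := by
  intro grid _ hpre
  unfold Spec_count_timelines_super_fast
  exact pv_main grid hpre
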